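-- pv_equiv track=rewrite | github.com/bengo501/Lista_projetoEotimiza-oDeAlgoritmos | solucoes/3_programacao_dinamica/ex2_calcadas.py | calcadas_sem_amarelas_nem_azuis_consecutivas
-- ===== SOURCE A (Python) =====
-- def calcadas_sem_amarelas_nem_azuis_consecutivas(n):
--     """
--     (c) sem amarelas consecutivas e sem azuis consecutivas.
--     """
--     if n == 0:
--         return 1
--     if n == 1:
--         return 3
--
--     # dp[i][cor] = numero de calcadas de tamanho i terminando na cor
--     # cor: 0=verde, 1=azul, 2=amarela
--
--     dp = [[0] * 3 for _ in range(n + 1)]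
--
--     # caso base
--     dp[1][0] = 1
--     dp[1][1] = 1
--     dp[1][2] = 1
--
--     for i in range(2, n + 1):
--         # verde: pode vir depois de qualquer cor
--         dp[i][0] = dp[i-1][0] + dp[i-1][1] + dp[i-1][2]
--
--         # azul: pode vir depois de verde ou amarela (nao azul)
--         dp[i][1] = dp[i-1][0] + dp[i-1][2]
--
--         # amarela: pode vir depois de verde ou azul (nao amarela)
--         dp[i][2] = dp[i-1][0] + dp[i-1][1]
--
--     return dp[n][0] + dp[n][1] + dp[n][2]
-- ===== SOURCE B (Python) =====
-- def calcadas_sem_amarelas_nem_azuis_consecutivas(n):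
--     """
--     (c) sem amarelas consecutivas e sem azuis consecutivas.
--
--     The total count T(n) satisfies T(n) = 2*T(n-1) + T(n-2) with T(0)=1, T(1)=3,
--     so T(n) = P(n) + P(n+1) for the Pell numbers, computed here in O(log n)
--     by fast exponentiation of the 2x2 matrix [[2,1],[1,0]].
--     """
--     def mul(A, B):
--         return (A[0] * B[0] + A[1] * B[2], A[0] * B[1] + A[1] * B[3],
--                 A[2] * B[0] + A[3] * B[2], A[2] * B[1] + A[3] * B[3])
--
--     def mpow(M, k):
--         R = (1, 0, 0, 1)
--         while k > 0:
--             if k & 1: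
--                 R = mul(R, M)
--             M = mul(M, M)
--             k >>= 1
--         return R
--
--     a, b, _, _ = mpow((2, 1, 1, 0), n)
--     # M^n = [[P(n+1), P(n)], [P(n), P(n-1)]]; answer = P(n+1) + P(n)
--     return a + b
-- ===== Notes on version B (the rewrite author's own statement) =====
-- stated objective: faster
-- what changed: Replaced the O(n) three-state DP table with O(log n) binary exponentiation of a fixed 2x2 transition matrix, using the collapsed two-term recurrence for the total count.
-- outside the precondition, e.g. on calcadas_sem_amarelas_nem_azuis_consecutivas(-2): A raises IndexError, B returns 1
import Mathlib
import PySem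

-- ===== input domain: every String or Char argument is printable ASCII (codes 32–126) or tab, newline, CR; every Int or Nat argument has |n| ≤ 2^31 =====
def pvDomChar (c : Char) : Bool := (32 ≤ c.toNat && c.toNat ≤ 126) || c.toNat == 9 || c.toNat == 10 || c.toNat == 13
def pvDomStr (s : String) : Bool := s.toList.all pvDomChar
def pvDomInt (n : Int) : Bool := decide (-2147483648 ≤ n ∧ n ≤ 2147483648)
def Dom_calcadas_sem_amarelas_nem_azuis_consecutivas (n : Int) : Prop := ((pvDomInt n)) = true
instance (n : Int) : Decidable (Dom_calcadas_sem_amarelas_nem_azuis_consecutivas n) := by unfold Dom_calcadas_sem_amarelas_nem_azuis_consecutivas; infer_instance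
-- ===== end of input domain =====

-- B replaces A's O(n) three-state DP table by binary exponentiation of a fixed 2x2 matrix
-- (the total count obeys a two-term linear recurrence).

-- ===== PORT A =====
-- dp[i][j] read/write helpers (all indices are nonnegative on the admitted inputs, so
-- .toNat is exact there)
def pvGet2 (dp : List (List Int)) (i j : Int) : Int :=
  (dp.getD i.toNat []).getD j.toNat 0

def pvSet2 (dp : List (List Int)) (i j : Int) (v : Int) : List (List Int) :=
  dp.set i.toNat ((dp.getD i.toNat []).set j.toNat v)

-- the body of A's `for i in range(2, n+1)` loop: the three assignments dp[i][0..2] = …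
def pvStep (dp : List (List Int)) (i : Int) : List (List Int) :=
  let dp := pvSet2 dp i 0 (pvGet2 dp (i-1) 0 + pvGet2 dp (i-1) 1 + pvGet2 dp (i-1) 2)
  let dp := pvSet2 dp i 1 (pvGet2 dp (i-1) 0 + pvGet2 dp (i-1) 2)
  let dp := pvSet2 dp i 2 (pvGet2 dp (i-1) 0 + pvGet2 dp (i-1) 1)
  dp

def calcadas_sem_amarelas_nem_azuis_consecutivas (n : Int) : Int :=
  if n = 0 then 1
  else if n = 1 then 3
  else
    -- dp = [[0]*3 for _ in range(n+1)]
    let dp : List (List Int) := List.replicate (n + 1).toNat (List.replicate 3 0)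
    let dp := pvSet2 dp 1 0 1
    let dp := pvSet2 dp 1 1 1
    let dp := pvSet2 dp 1 2 1
    let dp := (PySem.List.pyRange 2 (n + 1) 1).foldl pvStep dp
    pvGet2 dp n 0 + pvGet2 dp n 1 + pvGet2 dp n 2

-- ===== PORT B =====
-- 2x2 integer matrix (a, b, c, d) = [[a, b], [c, d]]; Source B's mul
def pvMul (A B : Int × Int × Int × Int) : Int × Int × Int × Int :=
  (A.1 * B.1 + A.2.1 * B.2.2.1, A.1 * B.2.1 + A.2.1 * B.2.2.2,
   A.2.2.1 * B.1 + A.2.2.2 * B.2.2.1, A.2.2.1 * B.2.1 + A.2.2.2 * B.2.2.2)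

-- Source B's `while k > 0` loop of mpow; k is a nonnegative Python int on every admitted
-- input, so it is carried as a Nat (k & 1 = k % 2, k >> 1 = k / 2)
def pvMpowAux (R M : Int × Int × Int × Int) (k : Nat) : Int × Int × Int × Int :=
  if k = 0 then R
  else pvMpowAux (if k % 2 = 1 then pvMul R M else R) (pvMul M M) (k / 2)
termination_by k
decreasing_by omega

def calcadas_sem_amarelas_nem_azuis_consecutivas_alt (n : Int) : Int :=
  let R := pvMpowAux (1, 0, 0, 1) (2, 1, 1, 0) n.toNat
  R.1 + R.2.1

-- ===== PRECONDITION & SPEC =====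
-- A raises IndexError on negative n (the dp table is then empty and the base-case assignment fails)
def Pre_calcadas_sem_amarelas_nem_azuis_consecutivas (n : Int) : Prop := 0 ≤ n
instance (n : Int) : Decidable (Pre_calcadas_sem_amarelas_nem_azuis_consecutivas n) := by
  unfold Pre_calcadas_sem_amarelas_nem_azuis_consecutivas; infer_instance

def pvWitness_calcadas_sem_amarelas_nem_azuis_consecutivas : Int := 5

def Spec_calcadas_sem_amarelas_nem_azuis_consecutivas (n : Int) (out : Int) : Prop := out = calcadas_sem_amarelas_nem_azuis_consecutivas_alt n
instance (n : Int) (out : Int) : Decidable (Spec_calcadas_sem_amarelas_nem_azuis_consecutivas n out) := by unfold Spec_calcadas_sem_amarelas_nem_azuis_consecutivas; infer_instance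

-- ===== CLAIM (what is proved, stated in full; the proofs are below) =====
def Claim_equal_calcadas_sem_amarelas_nem_azuis_consecutivas : Prop := ∀ (n : Int), Dom_calcadas_sem_amarelas_nem_azuis_consecutivas n → Pre_calcadas_sem_amarelas_nem_azuis_consecutivas n → Spec_calcadas_sem_amarelas_nem_azuis_consecutivas n (calcadas_sem_amarelas_nem_azuis_consecutivas n)

-- ===== LEMMAS AND PROOFS =====

-- T n = number of tilings: T 0 = 1, T 1 = 3, T (k+2) = 2*T (k+1) + T k
def pvT : Nat → Int
  | 0 => 1
  | 1 => 3
  | (k+2) => 2 * pvT (k+1) + pvT k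

-- Pell numbers
def pvP : Nat → Int
  | 0 => 0
  | 1 => 1
  | (k+2) => 2 * pvP (k+1) + pvP k

theorem pvT_rec (k : Nat) : pvT (k+2) = 2 * pvT (k+1) + pvT k := rfl
theorem pvP_rec (k : Nat) : pvP (k+2) = 2 * pvP (k+1) + pvP k := rfl

theorem pvT_eq_pell : ∀ k, pvT k = pvP k + pvP (k+1) := by
  intro k
  induction k using Nat.twoStepInduction with
  | zero => rfl
  | one => rfl
  | more k ih1 ih2 =>
    have e1 : pvP (k+1+1) = 2 * pvP (k+1) + pvP k := pvP_rec k
    have e2 : pvP (k+2+1) = 2 * pvP (k+1+1) + pvP (k+1) := pvP_rec (k+1)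
    rw [pvT_rec, ih1, ih2, show pvP (k+2) = pvP (k+1+1) from rfl, e2, e1]
    ring

-- ---- B side: binary exponentiation computes matrix powers ----

def pvPow (M : Int × Int × Int × Int) : Nat → Int × Int × Int × Int
  | 0 => (1, 0, 0, 1)
  | (k+1) => pvMul (pvPow M k) M

theorem pvMul_assoc (A B C : Int × Int × Int × Int) :
    pvMul (pvMul A B) C = pvMul A (pvMul B C) := by
  simp only [pvMul, Prod.mk.injEq]
  refine ⟨by ring, by ring, by ring, by ring⟩

theorem pvMul_one (R : Int × Int × Int × Int) : pvMul R (1, 0, 0, 1) = R := by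
  simp [pvMul]

theorem pvOne_mul (M : Int × Int × Int × Int) : pvMul (1, 0, 0, 1) M = M := by
  simp [pvMul]

theorem pvPow_sq (M : Int × Int × Int × Int) (m : Nat) :
    pvPow (pvMul M M) m = pvPow M (2 * m) := by
  induction m with
  | zero => rfl
  | succ m ih =>
    have h2 : 2 * (m + 1) = (2 * m) + 1 + 1 := by ring
    rw [h2]
    show pvMul (pvPow (pvMul M M) m) (pvMul M M) = _
    rw [ih, pvPow, pvPow, pvMul_assoc]

theorem pvMul_pow_comm (M : Int × Int × Int × Int) (k : Nat) :
    pvMul M (pvPow M k) = pvMul (pvPow M k) M := by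
  induction k with
  | zero => rw [pvPow, pvMul_one, pvOne_mul]
  | succ k ih =>
    rw [pvPow, ← pvMul_assoc, ih]

theorem pvMpowAux_eq (k : Nat) : ∀ (R M : Int × Int × Int × Int),
    pvMpowAux R M k = pvMul R (pvPow M k) := by
  induction k using Nat.strong_induction_on with
  | _ k ih =>
    intro R M
    rw [pvMpowAux]
    by_cases h0 : k = 0
    · subst h0; simp [pvPow, pvMul_one]
    · simp only [h0, if_false]
      rw [ih (k / 2) (by omega), pvPow_sq]
      by_cases hp : k % 2 = 1
      · have hk : (2 * (k / 2)).succ = k := by omega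
        simp only [hp, if_true]
        rw [pvMul_assoc, pvMul_pow_comm, ← pvPow, hk]
      · have hk : 2 * (k / 2) = k := by omega
        simp only [hp, if_false, hk]

theorem pvPow_entries : ∀ k, pvPow (2, 1, 1, 0) k
    = (pvP (k+1), pvP k, pvP k, pvP (k+1) - 2 * pvP k) := by
  intro k
  induction k with
  | zero => simp [pvPow, pvP]
  | succ k ih =>
    rw [pvPow, ih]
    have hp : pvP (k+1+1) = 2 * pvP (k+1) + pvP k := pvP_rec k
    simp only [pvMul, Prod.mk.injEq]
    refine ⟨?_, ?_, ?_, ?_⟩ <;> first | (rw [hp]; ring) | ring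

theorem alt_eq_pvT (n : Int) :
    calcadas_sem_amarelas_nem_azuis_consecutivas_alt n = pvT n.toNat := by
  simp only [calcadas_sem_amarelas_nem_azuis_consecutivas_alt, pvMpowAux_eq, pvOne_mul,
    pvPow_entries, pvT_eq_pell]
  ring

-- ---- A side: the dp table realises the same recurrence ----

-- pvABC k = dp[k+1] = (#ending green, #ending blue, #ending yellow)
def pvABC : Nat → Int × Int × Int
  | 0 => (1, 1, 1)
  | (k+1) =>
    let p := pvABC k
    (p.1 + p.2.1 + p.2.2, p.1 + p.2.2, p.1 + p.2.1)

def pvRow (i : Nat) : List Int :=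
  [(pvABC (i-1)).1, (pvABC (i-1)).2.1, (pvABC (i-1)).2.2]

theorem pvABC_rec (k : Nat) : pvABC (k+1)
    = ((pvABC k).1 + (pvABC k).2.1 + (pvABC k).2.2,
       (pvABC k).1 + (pvABC k).2.2, (pvABC k).1 + (pvABC k).2.1) := rfl

theorem pvABC_sum : ∀ k, ((pvABC k).1 + (pvABC k).2.1 + (pvABC k).2.2 = pvT (k+1))
    ∧ ((pvABC k).1 = pvT k) := by
  intro k
  induction k with
  | zero => constructor <;> rfl
  | succ k ih =>
    obtain ⟨h1, h2⟩ := ih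
    rw [pvABC_rec]
    constructor
    · show _ = pvT (k+2)
      rw [pvT_rec]; simp only []; rw [← h1, ← h2]; ring
    · exact h1

-- getD / set bookkeeping
theorem getD_set_self (l : List (List Int)) (i : Nat) (v : List Int) (h : i < l.length) :
    (l.set i v).getD i [] = v := by
  simp [List.getD_eq_getElem?_getD, h]

theorem getD_set_ne (l : List (List Int)) (i j : Nat) (v : List Int) (h : i ≠ j) :
    (l.set i v).getD j [] = l.getD j [] := by
  simp [List.getD_eq_getElem?_getD, List.getElem?_set_ne h]

-- one loop iteration: writes row a+1 from row a, leaves later rows zero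
theorem step_spec (N a : Nat) (dp : List (List Int)) (ha : 1 ≤ a) (hlt : a + 1 < N + 1)
    (hlen : dp.length = N + 1)
    (hrow : dp.getD a [] = pvRow a)
    (hzero : ∀ j, a < j → j < N + 1 → dp.getD j [] = [0, 0, 0]) :
    (pvStep dp ((a : Int) + 1)).length = N + 1
    ∧ (pvStep dp ((a : Int) + 1)).getD (a+1) [] = pvRow (a+1)
    ∧ (∀ j, a + 1 < j → j < N + 1 → (pvStep dp ((a : Int) + 1)).getD j [] = [0, 0, 0]) := by
  have hit : ((a : Int) + 1).toNat = a + 1 := by omega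
  have hit1 : ((a : Int) + 1 - 1).toNat = a := by omega
  have hane : a + 1 ≠ a := by omega
  have hlen' : a + 1 < dp.length := by omega
  have hz : dp.getD (a+1) [] = [0, 0, 0] := hzero _ (by omega) hlt
  have hcollapse : ∀ (v w : List Int), (dp.set (a+1) v).set (a+1) w = dp.set (a+1) w :=
    fun v w => List.set_set ..
  have g1 : ∀ v : List Int, ((dp.set (a+1) v).getD a []) = pvRow a := fun v => by
    rw [getD_set_ne _ _ _ _ hane]; exact hrow
  have s1 : ∀ v : List Int, ((dp.set (a+1) v).getD (a+1) []) = v := fun v =>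
    getD_set_self _ _ _ hlen'
  have key : pvStep dp ((a : Int) + 1)
      = dp.set (a+1) [(pvABC a).1, (pvABC a).2.1, (pvABC a).2.2] := by
    have ha' : a - 1 + 1 = a := by omega
    have habc := pvABC_rec (a-1)
    rw [ha'] at habc
    have ht2 : (2 : Int).toNat = 2 := rfl
    simp only [pvStep, pvSet2, pvGet2, hit, hit1, Int.toNat_zero, Int.toNat_one,
      ht2, hz, hcollapse, g1, s1, hrow]
    simp [pvRow, List.getD, habc]
  rw [key]
  refine ⟨by simp [hlen], ?_, ?_⟩
  · rw [getD_set_self _ _ _ hlen']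
    simp [pvRow]
  · intro j hj1 hj2
    rw [getD_set_ne _ _ _ _ (by omega)]
    exact hzero j (by omega) hj2

-- folding the loop body over range(a+1, a+1+k) carries the row invariant to a+k
theorem fold_spec (N : Nat) : ∀ (k a : Nat) (dp : List (List Int)),
    1 ≤ a → a + k ≤ N →
    dp.length = N + 1 →
    dp.getD a [] = pvRow a →
    (∀ j, a < j → j < N + 1 → dp.getD j [] = [0, 0, 0]) →
    ((PySem.List.pyRange ((a : Int) + 1) ((a : Int) + 1 + k) 1).foldl pvStep dp).length = N + 1
    ∧ ((PySem.List.pyRange ((a : Int) + 1) ((a : Int) + 1 + k) 1).foldl pvStep dp).getD (a + k) []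
        = pvRow (a + k) := by
  intro k
  induction k with
  | zero =>
    intro a dp ha hk hlen hrow hzero
    rw [PySem.List.pyRange_one_eq_nil (by omega)]
    exact ⟨hlen, by simpa using hrow⟩
  | succ k ih =>
    intro a dp ha hk hlen hrow hzero
    rw [PySem.List.pyRange_one_cons (by omega)]
    simp only [List.foldl_cons]
    obtain ⟨h1, h2, h3⟩ := step_spec N a dp ha (by omega) hlen hrow hzero
    have := ih (a + 1) (pvStep dp ((a : Int) + 1)) (by omega) (by omega) h1 h2 h3
    have hcast : ((a : Int) + 1 + 1) = (((a + 1 : Nat) : Int) + 1) := by push_cast; ring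
    have hcast2 : ((a : Int) + 1 + (k + 1 : Nat)) = (((a + 1 : Nat) : Int) + 1 + (k : Nat)) := by
      push_cast; ring
    rw [hcast, hcast2]
    have hidx : a + 1 + k = a + (k + 1) := by omega
    rw [hidx] at this
    exact this

theorem a_eq_pvT (n : Int) (hn : 0 ≤ n) :
    calcadas_sem_amarelas_nem_azuis_consecutivas n = pvT n.toNat := by
  unfold calcadas_sem_amarelas_nem_azuis_consecutivas
  by_cases h0 : n = 0
  · simp [h0, pvT]
  by_cases h1 : n = 1
  · simp [h1]; rfl
  simp only [h0, h1, if_false]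
  set N := n.toNat with hN
  have hn2 : 2 ≤ N := by omega
  have hlen0 : (n + 1).toNat = N + 1 := by omega
  -- the table after the three base-case assignments
  have hone : (1 : Int).toNat = 1 := rfl
  set dp0 : List (List Int) := List.replicate (n + 1).toNat (List.replicate 3 0) with hdp0
  have hlenr : dp0.length = N + 1 := by simp [hdp0, hlen0]
  have hget0 : ∀ j, j < N + 1 → dp0.getD j [] = [0, 0, 0] := by
    intro j hj
    simp [hdp0, List.getD_eq_getElem?_getD, hlen0, hj]
  set dp1 := pvSet2 (pvSet2 (pvSet2 dp0 1 0 1) 1 1 1) 1 2 1 with hdp1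
  have hlen1 : dp1.length = N + 1 := by simp [hdp1, pvSet2, hlenr]
  have hrow1 : dp1.getD 1 [] = pvRow 1 := by
    simp only [hdp1, pvSet2, hone]
    rw [getD_set_self _ _ _ (by simp [hlenr]; omega)]
    rw [getD_set_self _ _ _ (by simp [hlenr]; omega)]
    rw [getD_set_self _ _ _ (by simp [hlenr]; omega)]
    rw [hget0 1 (by omega)]
    rfl
  have hzero1 : ∀ j, 1 < j → j < N + 1 → dp1.getD j [] = [0, 0, 0] := by
    intro j hj1 hj2
    have hne : (1 : Nat) ≠ j := by omega
    simp only [hdp1, pvSet2, hone]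
    rw [getD_set_ne _ _ _ _ hne, getD_set_ne _ _ _ _ hne, getD_set_ne _ _ _ _ hne]
    exact hget0 j hj2
  -- run the loop
  have hrange : (PySem.List.pyRange 2 (n + 1) 1)
      = PySem.List.pyRange (((1 : Nat) : Int) + 1) (((1 : Nat) : Int) + 1 + (N - 1 : Nat)) 1 := by
    congr 1; omega
  have := fold_spec N (N - 1) 1 dp1 (by omega) (by omega) hlen1 hrow1 hzero1
  rw [← hrange] at this
  obtain ⟨hlenf, hrowf⟩ := this
  have hidx : 1 + (N - 1) = N := by omega
  rw [hidx] at hrowf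
  -- read off the answer
  simp only [pvGet2]
  have hnN : n.toNat = N := rfl
  rw [hnN, hrowf]
  have hNsub : N - 1 + 1 = N := by omega
  simp only [pvRow, List.getD]
  show (pvABC (N-1)).1 + (pvABC (N-1)).2.1 + (pvABC (N-1)).2.2 = pvT N
  rw [(pvABC_sum (N-1)).1, hNsub]

-- ===== VERDICT (by name: the statement is the Claim_ definition above) =====
theorem calcadas_sem_amarelas_nem_azuis_consecutivas_spec : Claim_equal_calcadas_sem_amarelas_nem_azuis_consecutivas := by
  intro n hd hpre
  unfold Spec_calcadas_sem_amarelas_nem_azuis_consecutivas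
  rw [a_eq_pvT n hpre, alt_eq_pvT n]
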